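-- pv_equiv track=rewrite | github.com/LongWeeeeeee/bets | base/test_filters.py | is_early_match_stable7k_5min
-- ===== SOURCE A (Python) =====
-- from typing import Tuple, Optional, Dict, Any
--
-- def is_early_match_stable7k_5min(match: Dict) -> Tuple[bool, Optional[str]]:
--     """Stable lead >= 7k минимум 5 минут подряд на 15-30."""
--     leads = match.get('radiantNetworthLeads', [])
--     duration = len(leads)
--
--     if duration < 30 or duration > 50:
--         return False, None
--
--     consecutive_r = 0
--     consecutive_d = 0
--
--     for i in range(15, min(30, duration)):
--         if leads[i] >= 7000:
--             consecutive_r += 1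
--             consecutive_d = 0
--             if consecutive_r >= 5:
--                 return True, 'radiant'
--         elif leads[i] <= -7000:
--             consecutive_d += 1
--             consecutive_r = 0
--             if consecutive_d >= 5:
--                 return True, 'dire'
--         else:
--             consecutive_r = 0
--             consecutive_d = 0
--
--     return False, None
-- ===== SOURCE B (Python) =====
-- def is_early_match_stable7k_5min(match):
--     """Stable lead >= 7k for at least 5 consecutive minutes within minutes 15-30."""
--     leads = match.get('radiantNetworthLeads', [])
--     duration = len(leads)
--
--     if duration < 30 or duration > 50:
--         return False, None
--
--     # sliding fixed-width window of 5 over the 15..30 segment, earliest start wins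
--     w = leads[15:30]
--     while len(w) >= 5:
--         head = w[:5]
--         if all(x >= 7000 for x in head):
--             return True, 'radiant'
--         if all(x <= -7000 for x in head):
--             return True, 'dire'
--         w = w[1:]
--     return False, None
-- ===== Notes on version B (the rewrite author's own statement) =====
-- stated objective: alternative
-- what changed: A tracks two consecutive-run counters over leads[15:30] with early returns; B instead slides a fixed 5-wide window over leads[15:30], returning at the earliest window whose 5 elements are all >= 7000 (radiant) or all <= -7000 (dire).
import Mathlib
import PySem

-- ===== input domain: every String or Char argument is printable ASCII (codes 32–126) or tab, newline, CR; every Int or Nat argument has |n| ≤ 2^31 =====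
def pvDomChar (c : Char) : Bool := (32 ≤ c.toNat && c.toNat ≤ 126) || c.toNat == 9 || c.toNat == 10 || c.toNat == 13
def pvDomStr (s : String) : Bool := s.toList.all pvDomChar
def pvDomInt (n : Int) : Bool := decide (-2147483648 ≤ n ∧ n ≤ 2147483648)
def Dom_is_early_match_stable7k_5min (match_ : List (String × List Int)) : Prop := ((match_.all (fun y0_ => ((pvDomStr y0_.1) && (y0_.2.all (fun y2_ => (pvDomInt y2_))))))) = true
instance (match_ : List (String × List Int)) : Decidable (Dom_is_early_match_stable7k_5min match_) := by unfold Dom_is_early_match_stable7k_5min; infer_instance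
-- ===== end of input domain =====

-- B replaces A's run-length counters with a fixed-width sliding window (all-of-5 checks) over
-- the same leads[15:30] segment; objective: alternative decomposition, same cost.

-- ===== PORT A =====
-- match.get('radiantNetworthLeads', []) : first-match lookup in the association list
def pvGetLeadsA (match_ : List (String × List Int)) : List Int :=
  match match_.find? (fun p => p.1 == "radiantNetworthLeads") with
  | some p => p.2
  | none => []

-- the for-loop over range(15, min(30, duration)) with the two run counters and early returns
def pvLoopA (leads : List Int) (cr cd : Int) : List Int → Bool × Option String
  | [] => (false, none)
  | i :: rest =>
    match PySem.List.pyGet? leads i with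
    | none => (false, none)  -- leads[i] IndexError; unreachable: 15 ≤ i < min 30 leads.length
    | some x =>
      if x ≥ 7000 then
        if cr + 1 ≥ 5 then (true, some "radiant") else pvLoopA leads (cr + 1) 0 rest
      else if x ≤ -7000 then
        if cd + 1 ≥ 5 then (true, some "dire") else pvLoopA leads 0 (cd + 1) rest
      else pvLoopA leads 0 0 rest

def is_early_match_stable7k_5min (match_ : List (String × List Int)) : Bool × Option String :=
  let leads := pvGetLeadsA match_
  let duration : Int := leads.length
  if duration < 30 ∨ duration > 50 then (false, none)
  else pvLoopA leads 0 0 (PySem.List.pyRange 15 (min 30 duration))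

-- ===== PORT B =====
-- the while-loop of Source B: check the 5-element head window, then w = w[1:]
def pvLoopB (w : List Int) : Bool × Option String :=
  if h : w.length ≥ 5 then
    let head := PySem.List.slice w none (some 5)
    if head.all (fun x => x ≥ 7000) then (true, some "radiant")
    else if head.all (fun x => x ≤ -7000) then (true, some "dire")
    else pvLoopB w.tail
  else (false, none)
termination_by w.length
decreasing_by cases w with
  | nil => simp at h
  | cons a t => simp

def is_early_match_stable7k_5min_alt (match_ : List (String × List Int)) : Bool × Option String :=
  let leads := ((match_.lookup "radiantNetworthLeads").getD [])
  let duration : Int := leads.length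
  if duration < 30 ∨ duration > 50 then (false, none)
  else pvLoopB (PySem.List.slice leads (some 15) (some 30))

-- ===== PRECONDITION & SPEC =====
def Spec_is_early_match_stable7k_5min (match_ : List (String × List Int)) (out : Bool × Option String) : Prop := out = is_early_match_stable7k_5min_alt match_
instance (match_ : List (String × List Int)) (out : Bool × Option String) : Decidable (Spec_is_early_match_stable7k_5min match_ out) := by unfold Spec_is_early_match_stable7k_5min; infer_instance

-- ===== CLAIM (what is proved, stated in full; the proofs are below) =====
def Claim_equal_is_early_match_stable7k_5min : Prop := ∀ (match_ : List (String × List Int)), Dom_is_early_match_stable7k_5min match_ → Spec_is_early_match_stable7k_5min match_ (is_early_match_stable7k_5min match_)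

-- ===== LEMMAS AND PROOFS =====

-- both ports extract the same leads list
theorem pvGetLeads_eq (match_ : List (String × List Int)) :
    pvGetLeadsA match_ = (match_.lookup "radiantNetworthLeads").getD [] := by
  induction match_ with
  | nil => rfl
  | cons p t ih =>
    obtain ⟨k, v⟩ := p
    by_cases hk : k = "radiantNetworthLeads"
    · subst hk; simp [pvGetLeadsA, List.find?, List.lookup]
    · have hb1 : (k == "radiantNetworthLeads") = false := beq_false_of_ne hk
      have hb2 : ("radiantNetworthLeads" == k) = false := beq_false_of_ne (Ne.symm hk)
      simp only [pvGetLeadsA, List.find?, List.lookup, hb1, hb2] at *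
      exact ih

-- A's loop with the elements in place of the indices (bridge target)
def pvLoopAe (cr cd : Int) : List Int → Bool × Option String
  | [] => (false, none)
  | x :: rest =>
      if x ≥ 7000 then
        if cr + 1 ≥ 5 then (true, some "radiant") else pvLoopAe (cr + 1) 0 rest
      else if x ≤ -7000 then
        if cd + 1 ≥ 5 then (true, some "dire") else pvLoopAe 0 (cd + 1) rest
      else pvLoopAe 0 0 rest

theorem pvLoopA_bridge (leads : List Int) (hlen : 30 ≤ leads.length) :
    ∀ (k j : Nat), j + k = 30 → ∀ (cr cd : Int),
      pvLoopA leads cr cd (PySem.List.pyRange (j : Int) 30) =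
        pvLoopAe cr cd ((leads.take 30).drop j) := by
  intro k
  induction k with
  | zero =>
    intro j hj cr cd
    have hj' : j = 30 := by omega
    subst hj'
    have h1 : PySem.List.pyRange ((30 : Nat) : Int) 30 = [] := by
      simp [PySem.List.pyRange]
    have h2 : (leads.take 30).drop 30 = [] := by simp
    rw [h1, h2]
    rfl
  | succ k ih =>
    intro j hj cr cd
    have hjlt : j < 30 := by omega
    have hjl : j < leads.length := by omega
    have hr : PySem.List.pyRange ((j : Nat) : Int) 30 = (j : Int) :: PySem.List.pyRange ((j : Int) + 1) 30 :=
      PySem.List.pyRange_one_cons (by exact_mod_cast hjlt)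
    have hget : PySem.List.pyGet? leads ((j : Nat) : Int) = some leads[j] := by
      rw [PySem.List.pyGet?_natCast]
      exact List.getElem?_eq_getElem hjl
    have hdrop : (leads.take 30).drop j = leads[j] :: (leads.take 30).drop (j + 1) := by
      have hjt : j < (leads.take 30).length := by simp; omega
      have := List.getElem_cons_drop (as := leads.take 30) (i := j) hjt
      rw [← this, List.getElem_take]
    have hcast : ((j : Int) + 1) = (((j + 1 : Nat)) : Int) := by push_cast; ring
    rw [hr, hdrop]
    simp only [pvLoopA, pvLoopAe, hget]
    by_cases h1 : leads[j] ≥ 7000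
    · by_cases h2 : cr + 1 ≥ 5
      · simp [h1, h2]
      · simp only [h1, h2, if_true, if_false, if_pos, if_neg]
        rw [hcast, ih (j + 1) (by omega)]
    · by_cases h2 : leads[j] ≤ -7000
      · by_cases h3 : cd + 1 ≥ 5
        · simp [h1, h2, h3]
        · simp only [h1, h2, h3, if_true, if_false, if_pos, if_neg]
          rw [hcast, ih (j + 1) (by omega)]
      · simp only [h1, h2, if_false, if_neg]
        rw [hcast, ih (j + 1) (by omega)]

theorem pvLoopB_short (w : List Int) (h : w.length < 5) : pvLoopB w = (false, none) := by
  rw [pvLoopB]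
  simp [Nat.not_le.mpr h]

theorem pvHead_take (w : List Int) : PySem.List.slice w none (some 5) = w.take 5 := by
  rw [PySem.List.slice_to w (by norm_num)]
  rfl

-- one unfolding step of B's window loop when both checks fail
theorem pvLoopB_step (w : List Int) (h : w.length ≥ 5)
    (hr : ((w.take 5).all fun z => decide (z ≥ 7000)) = false)
    (hd : ((w.take 5).all fun z => decide (z ≤ -7000)) = false) :
    pvLoopB w = pvLoopB w.tail := by
  rw [pvLoopB, dif_pos h]
  simp [pvHead_take, hr, hd]

theorem pvLoopB_radiant (w : List Int) (h : w.length ≥ 5)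
    (hr : ((w.take 5).all fun z => decide (z ≥ 7000)) = true) :
    pvLoopB w = (true, some "radiant") := by
  rw [pvLoopB, dif_pos h]
  simp [pvHead_take, hr]

theorem pvLoopB_dire (w : List Int) (h : w.length ≥ 5)
    (hr : ((w.take 5).all fun z => decide (z ≥ 7000)) = false)
    (hd : ((w.take 5).all fun z => decide (z ≤ -7000)) = true) :
    pvLoopB w = (true, some "dire") := by
  rw [pvLoopB, dif_pos h]
  simp [pvHead_take, hr, hd]

theorem pvMemTake (pref : List Int) (x : Int) (t : List Int) (h : pref.length ≤ 4) :
    x ∈ (pref ++ x :: t).take 5 := by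
  rw [List.take_append, List.take_of_length_le (by omega)]
  refine List.mem_append.mpr (Or.inr ?_)
  cases hc : 5 - pref.length with
  | zero => omega
  | succ m => simp [List.take_succ_cons]

-- a window containing one "neutral" element fails both all-of-5 checks, so B skips it
theorem pvSkipN (x : Int) (hx1 : ¬ x ≥ 7000) (hx2 : ¬ x ≤ -7000) :
    ∀ (pref : List Int), pref.length ≤ 4 → ∀ (t : List Int),
      pvLoopB (pref ++ x :: t) = pvLoopB t := by
  intro pref
  induction pref with
  | nil =>
    intro _ t
    simp only [List.nil_append]
    by_cases h : (x :: t).length ≥ 5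
    · have hmem : x ∈ (x :: t).take 5 := by simp [List.take_succ_cons]
      rw [pvLoopB_step _ h
        (by simp only [List.all_eq_false]; exact ⟨x, hmem, by simpa using hx1⟩)
        (by simp only [List.all_eq_false]; exact ⟨x, hmem, by simpa using hx2⟩)]
      rfl
    · have h' : t.length < 5 := by simp at h; omega
      rw [pvLoopB_short _ (by simp at h ⊢; omega), pvLoopB_short t h']
  | cons y p ih =>
    intro hlen t
    have hlen' : p.length ≤ 4 := by simp at hlen; omega
    by_cases h : ((y :: p) ++ x :: t).length ≥ 5
    · have hmem : x ∈ ((y :: p) ++ x :: t).take 5 :=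
        pvMemTake (y :: p) x t (by simpa using hlen)
      rw [pvLoopB_step _ h
        (by simp only [List.all_eq_false]; exact ⟨x, hmem, by simpa using hx1⟩)
        (by simp only [List.all_eq_false]; exact ⟨x, hmem, by simpa using hx2⟩)]
      simpa using ih hlen' t
    · have h' : t.length < 5 := by simp at h; omega
      rw [pvLoopB_short _ (by omega), pvLoopB_short t h']

-- a window holding a ≥7000 element and a ≤-7000 element fails both checks: skip the stale run
theorem pvSkipMix (s : Int) (hs : s = 1 ∨ s = -1) :
    ∀ (pref : List Int), pref.length ≤ 4 → (∀ y ∈ pref, y * s ≥ 7000) →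
    ∀ (x : Int), x * s ≤ -7000 → ∀ (t : List Int),
      pvLoopB (pref ++ x :: t) = pvLoopB (x :: t) := by
  intro pref
  induction pref with
  | nil => intro _ _ x _ t; rfl
  | cons y p ih =>
    intro hlen hall x hx t
    have hlen' : p.length ≤ 4 := by simp at hlen; omega
    by_cases h : ((y :: p) ++ x :: t).length ≥ 5
    · have hmemx : x ∈ ((y :: p) ++ x :: t).take 5 :=
        pvMemTake (y :: p) x t (by simpa using hlen)
      have hmemy : y ∈ ((y :: p) ++ x :: t).take 5 := by
        simp [List.take_succ_cons]
      have hy : y * s ≥ 7000 := hall y (by simp)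
      have hr : ((((y :: p) ++ x :: t).take 5).all fun z => decide (z ≥ 7000)) = false := by
        simp only [List.all_eq_false]
        rcases hs with h1 | h1
        · exact ⟨x, hmemx, by simp [h1] at hx ⊢; omega⟩
        · exact ⟨y, hmemy, by simp [h1] at hy ⊢; omega⟩
      have hd : ((((y :: p) ++ x :: t).take 5).all fun z => decide (z ≤ -7000)) = false := by
        simp only [List.all_eq_false]
        rcases hs with h1 | h1
        · exact ⟨y, hmemy, by simp [h1] at hy ⊢; omega⟩
        · exact ⟨x, hmemx, by simp [h1] at hx ⊢; omega⟩
      rw [pvLoopB_step _ h hr hd]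
      simpa using ih hlen' (fun z hz => hall z (by simp [hz])) x hx t
    · have h' : (x :: t).length < 5 := by simp at h ⊢; omega
      rw [pvLoopB_short _ (by omega), pvLoopB_short _ h']

-- the main invariant: A's counters ↔ a virtual all-one-sign prefix in front of B's window
theorem pvMain : ∀ (l : List Int), ∀ (pref : List Int), pref.length ≤ 4 →
    ((∀ y ∈ pref, y ≥ 7000) → pvLoopAe (pref.length : Int) 0 l = pvLoopB (pref ++ l)) ∧
    ((∀ y ∈ pref, y ≤ -7000) → pvLoopAe 0 (pref.length : Int) l = pvLoopB (pref ++ l)) := by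
  intro l
  induction l with
  | nil =>
    intro pref hlen
    constructor <;> intro _ <;>
      · simp only [pvLoopAe, List.append_nil]
        rw [pvLoopB_short pref (by omega)]
  | cons x t ih =>
    intro pref hlen
    constructor
    · -- radiant prefix, counter cr = pref.length, cd = 0
      intro hall
      simp only [pvLoopAe]
      by_cases h1 : x ≥ 7000
      · by_cases h2 : (pref.length : Int) + 1 ≥ 5
        · -- run completed: B's head window is pref ++ [x], all ≥ 7000
          have hl4 : pref.length = 4 := by omega
          have hge : (pref ++ x :: t).length ≥ 5 := by simp only [List.length_append, List.length_cons, hl4]; omega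
          have htk : (pref ++ x :: t).take 5 = pref ++ [x] := by
            have he : pref ++ x :: t = (pref ++ [x]) ++ t := by simp
            rw [he, List.take_left' (by simp [hl4])]
          have hr : (((pref ++ x :: t).take 5).all fun z => decide (z ≥ 7000)) = true := by
            rw [htk]; simp only [List.all_eq_true]
            intro z hz
            simp only [List.mem_append, List.mem_singleton] at hz
            rcases hz with hz | hz
            · simpa using hall z hz
            · subst hz; simpa using h1
          rw [pvLoopB_radiant _ hge hr]
          simp [h1, h2]
        · -- run continues: extend the virtual prefix with x
          simp only [h1, h2, if_pos, if_neg, if_false]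
          have hcast : (pref.length : Int) + 1 = (((pref ++ [x]).length : Nat) : Int) := by
            simp
          rw [hcast]
          have heq := (ih (pref ++ [x]) (by simp; omega)).1
            (by intro z hz; simp only [List.mem_append, List.mem_singleton] at hz
                rcases hz with hz | hz
                · exact hall z hz
                · subst hz; exact h1)
          rw [heq]
          simp
      · by_cases h2 : x ≤ -7000
        · -- sign flip: counter resets to cd = 1; B skips windows starting inside pref
          simp only [h1, h2, if_neg, if_pos, if_false]
          have h3 : ¬ ((0 : Int) + 1 ≥ 5) := by norm_num
          rw [if_neg h3]
          rw [pvSkipMix 1 (Or.inl rfl) pref hlen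
            (by intro y hy; simpa using hall y hy) x (by simpa using h2) t]
          have heq := (ih [x] (by simp)).2 (by intro z hz; simp at hz; subst hz; exact h2)
          simpa using heq
        · -- neutral element: both runs reset; B skips all windows containing x
          simp only [h1, h2, if_neg, if_false]
          rw [pvSkipN x h1 h2 pref hlen t]
          have heq := (ih [] (by simp)).1 (by intro z hz; simp at hz)
          simpa using heq
    · -- dire prefix, symmetric
      intro hall
      simp only [pvLoopAe]
      by_cases h1 : x ≥ 7000
      · -- sign flip to a radiant run of length 1
        simp only [h1, if_pos]
        have h3 : ¬ ((0 : Int) + 1 ≥ 5) := by norm_num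
        rw [if_neg h3]
        rw [pvSkipMix (-1) (Or.inr rfl) pref hlen
          (by intro y hy; have := hall y hy; simp at this ⊢; omega)
          x (by simp at h1 ⊢; omega) t]
        have heq := (ih [x] (by simp)).1 (by intro z hz; simp at hz; subst hz; exact h1)
        simpa using heq
      · by_cases h2 : x ≤ -7000
        · by_cases h3 : (pref.length : Int) + 1 ≥ 5
          · have hl4 : pref.length = 4 := by omega
            have hge : (pref ++ x :: t).length ≥ 5 := by simp only [List.length_append, List.length_cons, hl4]; omega
            have htk : (pref ++ x :: t).take 5 = pref ++ [x] := by
              have he : pref ++ x :: t = (pref ++ [x]) ++ t := by simp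
              rw [he, List.take_left' (by simp [hl4])]
            have hd : (((pref ++ x :: t).take 5).all fun z => decide (z ≤ -7000)) = true := by
              rw [htk]; simp only [List.all_eq_true]
              intro z hz
              simp only [List.mem_append, List.mem_singleton] at hz
              rcases hz with hz | hz
              · simpa using hall z hz
              · subst hz; simpa using h2
            have hr : (((pref ++ x :: t).take 5).all fun z => decide (z ≥ 7000)) = false := by
              rw [htk]; simp only [List.all_eq_false]
              exact ⟨x, by simp, by simp at h2 ⊢; omega⟩
            rw [pvLoopB_dire _ hge hr hd]
            simp [h1, h2, h3]
          · simp only [h1, h2, h3, if_pos, if_neg, if_false]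
            have hcast : (pref.length : Int) + 1 = (((pref ++ [x]).length : Nat) : Int) := by
              simp
            rw [hcast]
            have heq := (ih (pref ++ [x]) (by simp; omega)).2
              (by intro z hz; simp only [List.mem_append, List.mem_singleton] at hz
                  rcases hz with hz | hz
                  · exact hall z hz
                  · subst hz; exact h2)
            rw [heq]
            simp
        · simp only [h1, h2, if_neg, if_false]
          rw [pvSkipN x h1 h2 pref hlen t]
          have heq := (ih [] (by simp)).2 (by intro z hz; simp at hz)
          simpa using heq

-- ===== VERDICT (by name: the statement is the Claim_ definition above) =====
theorem is_early_match_stable7k_5min_spec : Claim_equal_is_early_match_stable7k_5min := by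
  intro match_ _
  unfold Spec_is_early_match_stable7k_5min
  unfold is_early_match_stable7k_5min is_early_match_stable7k_5min_alt
  rw [pvGetLeads_eq]
  set leads := (match_.lookup "radiantNetworthLeads").getD [] with hleads
  simp only
  by_cases hdur : ((leads.length : Int) < 30 ∨ (leads.length : Int) > 50)
  · rw [if_pos hdur, if_pos hdur]
  · rw [if_neg hdur, if_neg hdur]
    push_neg at hdur
    have hlen : 30 ≤ leads.length := by exact_mod_cast hdur.1
    have hmin : min (30 : Int) (leads.length : Int) = 30 := by
      have : (30 : Int) ≤ (leads.length : Int) := by exact_mod_cast hlen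
      omega
    rw [hmin]
    have h15 : (15 : Int) = ((15 : Nat) : Int) := by norm_num
    have h30 : (30 : Int) = ((30 : Nat) : Int) := by norm_num
    rw [h15, pvLoopA_bridge leads hlen 15 15 (by omega)]
    have hslice : PySem.List.slice leads (some ((15 : Nat) : Int)) (some 30) = (leads.take 30).drop 15 := by
      rw [h30, PySem.List.slice_natCast, List.drop_take]
    rw [hslice]
    have heq := (pvMain ((leads.take 30).drop 15) [] (by simp)).1 (by intro z hz; simp at hz)
    simpa using heq
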